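-- pv_equiv track=rewrite | github.com/codnegaar/Leetcode_DC | Leetcode 1593 Split a String Into the Max Number of Unique Substrings.py | maxUniqueSplit
-- ===== SOURCE A (Python) =====
-- def maxUniqueSplit(s: str) -> int:
--     """
--     This function finds the maximum number of unique splits that can be made from the input string.
--
--     @param self: Represents the instance of the class Solution.
--     @param s: The input string that needs to be split into unique substrings.
--     @return: Maximum number of unique splits of the input string.
--     """
--
--     def backtrack(start: int, seen: set) -> int:
--         """
--         A helper function that recursively finds the maximum number of unique splits.
--
--         @param start: The current starting index from which to split the string.
--         @param seen: A set containing all unique substrings seen so far.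
--         @return: The maximum number of unique splits from the current start index.
--         """
--         # If we have reached the end of the string, there are no more splits possible.
--         if start == len(s):
--             return 0
--
--         # Variable to track the maximum number of unique splits.
--         max_splits = 0
--
--         # Iterate from the current start to the end of the string to find substrings.
--         for end in range(start + 1, len(s) + 1):
--             substring = s[start:end]  # Generate the substring from start to end index.
--
--             # If this substring has not been seen before, we attempt to use it.
--             if substring not in seen:
--                 seen.add(substring)  # Add the substring to the set of seen substrings.
--                 # Recursively call backtrack to continue splitting from the current end index.
--                 max_splits = max(max_splits, 1 + backtrack(end, seen))
--                 seen.remove(substring)  # Remove the substring to backtrack and try other options.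
--
--         return max_splits
--
--     # Start the backtracking process from index 0 with an empty set for unique substrings.
--     return backtrack(0, set())
-- ===== SOURCE B (Python) =====
-- def maxUniqueSplit(s: str) -> int:
--     # Iterative DFS with an explicit stack of (start, pieces_so_far, used-substrings) states.
--     ans = 0
--     stack = [(0, 0, frozenset())]
--     while stack:
--         start, pieces, used = stack.pop()
--         if pieces > ans:
--             ans = pieces
--         for end in range(start + 1, len(s) + 1):
--             sub = s[start:end]
--             if sub not in used:
--                 stack.append((end, pieces + 1, used | {sub}))
--     return ans
-- ===== Notes on version B (the rewrite author's own statement) =====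
-- stated objective: alternative
-- what changed: A's recursive backtracking with a mutated seen-set is replaced by an iterative depth-first search over an explicit stack of (start, pieces_so_far, used-substrings) states, taking the running maximum of pieces over every popped state.
import Mathlib
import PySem

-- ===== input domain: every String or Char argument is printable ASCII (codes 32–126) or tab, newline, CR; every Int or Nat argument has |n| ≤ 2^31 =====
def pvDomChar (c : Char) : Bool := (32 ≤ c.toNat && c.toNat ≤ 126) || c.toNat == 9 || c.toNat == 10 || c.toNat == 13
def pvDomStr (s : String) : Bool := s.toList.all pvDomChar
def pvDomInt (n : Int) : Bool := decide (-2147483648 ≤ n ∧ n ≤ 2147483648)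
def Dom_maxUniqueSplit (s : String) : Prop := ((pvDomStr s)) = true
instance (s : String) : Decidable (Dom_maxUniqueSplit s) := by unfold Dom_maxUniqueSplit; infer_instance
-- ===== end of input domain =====

-- B replaces A's recursive backtracking by an iterative DFS over an explicit stack of
-- (start, pieces, used) states; same exponential search, different control structure ("alternative").

-- s[start:end] for 0 ≤ start ≤ end (exact: equals PySem.List.slice by PySem.List.slice_natCast)
def pvSub (l : List Char) (a b : Nat) : List Char := (l.drop a).take (b - a)

-- ===== PORT A =====
-- range(start+1, len(s)+1): bounds are nonnegative, so List.range' (start+1) (len-start) is exact.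
-- Python mutates 'seen' around the recursive call (add / recurse / remove); since the substring is
-- not in 'seen', the call sees exactly 'seen.add sub' and 'seen' is restored — ported purely.
def pvBacktrack (l : List Char) (start : Nat) (seen : PySem.Set (List Char)) : Int :=
  if start = l.length then 0
  else
    (List.range' (start + 1) (l.length - start)).attach.foldl
      (fun maxSplits e =>
        if PySem.Set.contains seen (pvSub l start e.1) then maxSplits
        else max maxSplits (1 + pvBacktrack l e.1 (PySem.Set.add seen (pvSub l start e.1))))
      0
termination_by l.length - start
decreasing_by
  have h := List.mem_range'_1.mp e.2
  omega

def maxUniqueSplit (s : String) : Int :=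
  pvBacktrack s.toList 0 PySem.Set.empty

-- ===== PORT B =====
-- A DFS state (start, pieces_so_far, used); the Lean list's head is the stack's top.
-- 'used | {sub}' is PySem.Set.add (sub is not in 'used' on the branch taken).
-- The fuel argument only makes the loop structurally total; pvFuel below always suffices (proved).
def pvLoop (l : List Char) (fuel : Nat) (stack : List (Nat × Int × PySem.Set (List Char)))
    (ans : Int) : Int :=
  match stack with
  | [] => ans
  | (start, pieces, used) :: rest =>
    match fuel with
    | 0 => ans
    | fuel' + 1 =>
      pvLoop l fuel'
        ((List.range' (start + 1) (l.length - start)).foldl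
          (fun st e =>
            if PySem.Set.contains used (pvSub l start e) then st
            else (e, pieces + 1, PySem.Set.add used (pvSub l start e)) :: st)
          rest)
        (max ans pieces)

def maxUniqueSplit_alt (s : String) : Int :=
  pvLoop s.toList (2 ^ s.toList.length) [(0, 0, PySem.Set.empty)] 0

-- ===== PRECONDITION & SPEC =====
def Spec_maxUniqueSplit (s : String) (out : Int) : Prop := out = maxUniqueSplit_alt s
instance (s : String) (out : Int) : Decidable (Spec_maxUniqueSplit s out) := by unfold Spec_maxUniqueSplit; infer_instance

-- ===== CLAIM (what is proved, stated in full; the proofs are below) =====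
def Claim_equal_maxUniqueSplit : Prop := ∀ (s : String), Dom_maxUniqueSplit s → Spec_maxUniqueSplit s (maxUniqueSplit s)

-- ===== LEMMAS AND PROOFS =====

-- value of a DFS state: pieces collected so far plus the best continuation (A's backtrack)
def pvVal (l : List Char) (p : Nat × Int × PySem.Set (List Char)) : Int :=
  p.2.1 + pvBacktrack l p.1 p.2.2

def pvStackVal (l : List Char) (st : List (Nat × Int × PySem.Set (List Char))) (ans : Int) : Int :=
  st.foldl (fun a p => max a (pvVal l p)) ans

def pvMeasure (n : Nat) (st : List (Nat × Int × PySem.Set (List Char))) : Nat :=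
  (st.map (fun p => 2 ^ (n - p.1))).sum

-- generic facts about folds of shape  fun a e => if P e then a else max a (w e)
theorem pv_foldl_ge (P : Nat → Bool) (w : Nat → Int) :
    ∀ (ends : List Nat) (x : Int),
      x ≤ ends.foldl (fun a e => if P e then a else max a (w e)) x := by
  intro ends
  induction ends with
  | nil => intro x; simp
  | cons e es ih =>
    intro x
    simp only [List.foldl_cons]
    refine le_trans ?_ (ih _)
    split <;> simp

theorem pv_foldl_add (P : Nat → Bool) (w : Nat → Int) :
    ∀ (ends : List Nat) (k x : Int),
      k + ends.foldl (fun a e => if P e then a else max a (w e)) x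
        = ends.foldl (fun a e => if P e then a else max a (k + w e)) (k + x) := by
  intro ends
  induction ends with
  | nil => intro k x; simp
  | cons e es ih =>
    intro k x
    simp only [List.foldl_cons]
    split
    · exact ih k x
    · rw [max_add_add_left]
      exact ih k _

theorem pv_foldl_max (P : Nat → Bool) (w : Nat → Int) :
    ∀ (ends : List Nat) (a b : Int),
      ends.foldl (fun a e => if P e then a else max a (w e)) (max a b)
        = max (ends.foldl (fun a e => if P e then a else max a (w e)) a) b := by
  intro ends
  induction ends with
  | nil => intro a b; simp
  | cons e es ih =>
    intro a b
    simp only [List.foldl_cons]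
    split
    · exact ih a b
    · rw [max_right_comm, ih]

-- pvBacktrack unfolded to a fold over a plain range (valid also when start = l.length)
theorem pvBacktrack_eq_fold (l : List Char) (start : Nat) (seen : PySem.Set (List Char)) :
    pvBacktrack l start seen
      = (List.range' (start + 1) (l.length - start)).foldl
          (fun a e =>
            if PySem.Set.contains seen (pvSub l start e) then a
            else max a (1 + pvBacktrack l e (PySem.Set.add seen (pvSub l start e))))
          0 := by
  rw [pvBacktrack]
  split
  · rename_i h
    rw [h]
    simp
  · exact List.foldl_attach
      (l := List.range' (start + 1) (l.length - start))
      (f := fun a e =>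
        if PySem.Set.contains seen (pvSub l start e) then a
        else max a (1 + pvBacktrack l e (PySem.Set.add seen (pvSub l start e)))) (b := 0)

theorem pvBacktrack_nonneg (l : List Char) (start : Nat) (seen : PySem.Set (List Char)) :
    0 ≤ pvBacktrack l start seen := by
  rw [pvBacktrack_eq_fold]
  exact pv_foldl_ge (fun e => PySem.Set.contains seen (pvSub l start e))
    (fun e => 1 + pvBacktrack l e (PySem.Set.add seen (pvSub l start e))) _ 0

-- pushing children onto the stack folds their values into the accumulator
theorem pv_stackVal_push (l : List Char) (P : Nat → Bool)
    (c : Nat → Nat × Int × PySem.Set (List Char)) :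
    ∀ (ends : List Nat) (rest : List (Nat × Int × PySem.Set (List Char))) (A : Int),
      pvStackVal l (ends.foldl (fun st e => if P e then st else c e :: st) rest) A
        = pvStackVal l rest
            (ends.foldl (fun a e => if P e then a else max a (pvVal l (c e))) A) := by
  intro ends
  induction ends with
  | nil => intro rest A; rfl
  | cons e es ih =>
    intro rest A
    simp only [List.foldl_cons]
    by_cases h : P e
    · rw [if_pos h, if_pos h]
      exact ih rest A
    · rw [if_neg h, if_neg h, ih (c e :: rest) A]
      show pvStackVal l rest
        (max (es.foldl (fun a e => if P e then a else max a (pvVal l (c e))) A) (pvVal l (c e))) = _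
      congr 1
      exact (pv_foldl_max P (fun e => pvVal l (c e)) es A (pvVal l (c e))).symm

-- measure of the pushed stack
theorem pv_measure_push (n : Nat) (P : Nat → Bool) (g : Nat → Int × PySem.Set (List Char)) :
    ∀ (ends : List Nat) (rest : List (Nat × Int × PySem.Set (List Char))),
      pvMeasure n (ends.foldl (fun st e => if P e then st else (e, g e) :: st) rest)
        ≤ pvMeasure n rest + (ends.map (fun e => 2 ^ (n - e))).sum := by
  intro ends
  induction ends with
  | nil => intro rest; simp
  | cons e es ih =>
    intro rest
    simp only [List.foldl_cons, List.map_cons, List.sum_cons]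
    by_cases h : P e
    · rw [if_pos h]
      have hd : 1 ≤ 2 ^ (n - e) := Nat.one_le_two_pow
      have := ih rest
      omega
    · rw [if_neg h]
      have h1 := ih ((e, g e) :: rest)
      have h2 : pvMeasure n ((e, g e) :: rest) = 2 ^ (n - e) + pvMeasure n rest := by
        simp [pvMeasure]
      omega

theorem pv_sum_range' (n : Nat) :
    ∀ (m a : Nat), a + m = n + 1 →
      ((List.range' a m).map (fun e => 2 ^ (n - e))).sum = 2 ^ m - 1 := by
  intro m
  induction m with
  | zero => intro a _; simp
  | succ m ih =>
    intro a ha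
    rw [List.range'_succ]
    simp only [List.map_cons, List.sum_cons]
    rw [ih (a + 1) (by omega)]
    have hna : n - a = m := by omega
    rw [hna]
    have h1 : 1 ≤ 2 ^ m := Nat.one_le_two_pow
    rw [pow_succ]
    omega

-- the main stack-machine invariant: with enough fuel, pvLoop computes the running max
-- of ans and the values of all stacked states
theorem pvLoop_eq_stackVal (l : List Char) :
    ∀ (fuel : Nat) (st : List (Nat × Int × PySem.Set (List Char))) (ans : Int),
      pvMeasure l.length st ≤ fuel →
      pvLoop l fuel st ans = pvStackVal l st ans := by
  intro fuel
  induction fuel with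
  | zero =>
    intro st ans h
    match st with
    | [] => rfl
    | (start, pieces, used) :: rest =>
      exfalso
      have h1 : 1 ≤ 2 ^ (l.length - start) := Nat.one_le_two_pow
      have h2 : pvMeasure l.length ((start, pieces, used) :: rest)
          = 2 ^ (l.length - start) + pvMeasure l.length rest := by simp [pvMeasure]
      omega
  | succ fuel ih =>
    intro st ans h
    match st with
    | [] => rfl
    | (start, pieces, used) :: rest =>
      rw [pvLoop]
      have hsum : ((List.range' (start + 1) (l.length - start)).map
          (fun e => 2 ^ (l.length - e))).sum ≤ 2 ^ (l.length - start) - 1 := by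
        by_cases hs : start ≤ l.length
        · rw [pv_sum_range' l.length (l.length - start) (start + 1) (by omega)]
        · have : l.length - start = 0 := by omega
          simp [this]
      have hmeas : pvMeasure l.length
          ((List.range' (start + 1) (l.length - start)).foldl
            (fun st e =>
              if PySem.Set.contains used (pvSub l start e) then st
              else (e, pieces + 1, PySem.Set.add used (pvSub l start e)) :: st)
            rest) ≤ fuel := by
        have hp := pv_measure_push l.length
          (fun e => PySem.Set.contains used (pvSub l start e))
          (fun e => (pieces + 1, PySem.Set.add used (pvSub l start e)))
          (List.range' (start + 1) (l.length - start)) rest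
        have h1 : 1 ≤ 2 ^ (l.length - start) := Nat.one_le_two_pow
        simp [pvMeasure] at h hp ⊢
        omega
      rw [ih _ _ hmeas]
      rw [pv_stackVal_push l
        (fun e => PySem.Set.contains used (pvSub l start e))
        (fun e => (e, pieces + 1, PySem.Set.add used (pvSub l start e)))]
      show pvStackVal l rest _ = pvStackVal l rest _
      congr 1
      have hval : ∀ e, pvVal l (e, pieces + 1, PySem.Set.add used (pvSub l start e))
          = pieces + 1 + pvBacktrack l e (PySem.Set.add used (pvSub l start e)) := fun _ => rfl
      calc (List.range' (start + 1) (l.length - start)).foldl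
            (fun a e => if PySem.Set.contains used (pvSub l start e) then a
              else max a (pvVal l (e, pieces + 1, PySem.Set.add used (pvSub l start e))))
            (max ans pieces)
          = (List.range' (start + 1) (l.length - start)).foldl
            (fun a e => if PySem.Set.contains used (pvSub l start e) then a
              else max a (pieces + (1 + pvBacktrack l e (PySem.Set.add used (pvSub l start e)))))
            (max pieces ans) := by rw [max_comm ans pieces]; simp only [hval, add_assoc]
        _ = max ((List.range' (start + 1) (l.length - start)).foldl
            (fun a e => if PySem.Set.contains used (pvSub l start e) then a
              else max a (pieces + (1 + pvBacktrack l e (PySem.Set.add used (pvSub l start e)))))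
            pieces) ans := pv_foldl_max _ _ _ pieces ans
        _ = max (pieces + pvBacktrack l start used) ans := by
            congr 1
            rw [pvBacktrack_eq_fold l start used,
              pv_foldl_add (fun e => PySem.Set.contains used (pvSub l start e))
                (fun e => 1 + pvBacktrack l e (PySem.Set.add used (pvSub l start e)))
                (List.range' (start + 1) (l.length - start)) pieces 0,
              add_zero]
        _ = max ans (pvVal l (start, pieces, used)) := by rw [max_comm]; rfl

-- ===== VERDICT (by name: the statement is the Claim_ definition above) =====
theorem maxUniqueSplit_spec : Claim_equal_maxUniqueSplit := by
  intro s _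
  show maxUniqueSplit s = maxUniqueSplit_alt s
  rw [maxUniqueSplit, maxUniqueSplit_alt,
    pvLoop_eq_stackVal s.toList _ _ 0 (by simp [pvMeasure])]
  show _ = max 0 (pvVal s.toList (0, 0, PySem.Set.empty))
  have h0 := pvBacktrack_nonneg s.toList 0 PySem.Set.empty
  show pvBacktrack s.toList 0 PySem.Set.empty
    = max 0 (0 + pvBacktrack s.toList 0 PySem.Set.empty)
  omega
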